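-- pv_equiv track=rewrite | github.com/Nblues/chiangmaiusedcar-next | process-css3.py | parse_css_blocks
-- ===== SOURCE A (Python) =====
-- def parse_css_blocks(css):
--     blocks = []
--     current_block = ""
--     brace_level = 0
--     in_comment = False
--
--     i = 0
--     while i < len(css):
--         char = css[i]
--
--         # Handle comments
--         if not in_comment and char == '/' and i + 1 < len(css) and css[i+1] == '*':
--             in_comment = True
--             current_block += char + '*'
--             i += 2
--             continue
--         if in_comment and char == '*' and i + 1 < len(css) and css[i+1] == '/':
--             in_comment = False
--             current_block += char + '/'
--             i += 2
--             # If block has no braces and is just a comment followed by whitespace, we might want to attach it to the next block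
--             # but for simplicity, we just keep accumulating.
--             continue
--
--         current_block += char
--
--         if not in_comment:
--             if char == '{':
--                 brace_level += 1
--             elif char == '}':
--                 brace_level -= 1
--                 if brace_level == 0:
--                     blocks.append(current_block.strip())
--                     current_block = ""
--         i += 1
--
--     if current_block.strip():
--         blocks.append(current_block.strip())
--
--     return blocks
-- ===== SOURCE B (Python) =====
-- import re
--
-- _EVENT = re.compile(r'/\*|\{|\}')
--
--
-- def parse_css_blocks(css):
--     blocks = []
--     start = 0
--     pos = 0
--     brace_level = 0
--     while True:
--         m = _EVENT.search(css, pos)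
--         if not m:
--             break
--         tok = m.group()
--         pos = m.end()
--         if tok == '/*':
--             close = css.find('*/', pos)
--             if close == -1:
--                 break
--             pos = close + 2
--         elif tok == '{':
--             brace_level += 1
--         else:
--             brace_level -= 1
--             if brace_level == 0:
--                 blocks.append(css[start:pos].strip())
--                 start = pos
--     tail = css[start:].strip()
--     if tail:
--         blocks.append(tail)
--     return blocks
-- ===== Notes on version B (the rewrite author's own statement) =====
-- stated objective: faster
-- what changed: Replaces A's per-character while loop that builds the current block by string concatenation with a regex-driven scan that jumps from delimiter to delimiter ('/*', '{', '}', and str.find for '*/'), keeping brace level only at those events and slicing the original text for each finished block.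
import Mathlib
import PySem

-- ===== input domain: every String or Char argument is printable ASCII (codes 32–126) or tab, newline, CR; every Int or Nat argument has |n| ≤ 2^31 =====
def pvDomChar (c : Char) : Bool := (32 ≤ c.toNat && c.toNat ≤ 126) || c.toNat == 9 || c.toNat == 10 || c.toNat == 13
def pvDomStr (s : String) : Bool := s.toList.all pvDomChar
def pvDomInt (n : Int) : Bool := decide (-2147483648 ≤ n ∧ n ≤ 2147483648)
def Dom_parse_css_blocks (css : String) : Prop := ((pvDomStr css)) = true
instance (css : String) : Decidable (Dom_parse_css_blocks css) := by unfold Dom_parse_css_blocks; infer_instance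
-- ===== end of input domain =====

-- B replaces A's per-character accumulating scan with an event scan (leftmost match of '/*'/'{'/'}'
-- plus find('*/') inside comments) that slices the original text; objective: faster (constant factor).

-- ===== PORT A =====
-- A's while loop over index i (with lookahead css[i+1] and the i+=2 skips) becomes structural
-- recursion over the remaining character list; current_block is accumulated exactly as A concatenates.
def parseA_loop : List Char → List String → List Char → Int → Bool → List String
  | [], blocks, cur, _, _ =>
      if PySem.Str.strip (String.mk cur) ≠ "" then blocks ++ [PySem.Str.strip (String.mk cur)] else blocks
  | c :: rest, blocks, cur, lvl, inc =>
      if ¬inc ∧ c = '/' ∧ rest.head? = some '*' then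
        parseA_loop rest.tail blocks (cur ++ ['/', '*']) lvl true
      else if inc ∧ c = '*' ∧ rest.head? = some '/' then
        parseA_loop rest.tail blocks (cur ++ ['*', '/']) lvl false
      else
        if ¬inc ∧ c = '{' then parseA_loop rest blocks (cur ++ [c]) (lvl + 1) inc
        else if ¬inc ∧ c = '}' then
          (if lvl - 1 = 0 then parseA_loop rest (blocks ++ [PySem.Str.strip (String.mk (cur ++ [c]))]) [] (lvl - 1) inc
           else parseA_loop rest blocks (cur ++ [c]) (lvl - 1) inc)
        else parseA_loop rest blocks (cur ++ [c]) lvl inc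
termination_by l _ _ _ _ => l.length
decreasing_by
  all_goals simp only [List.length_cons]
  · cases rest <;> simp
  · cases rest <;> simp
  all_goals omega

def parse_css_blocks (css : String) : List String :=
  parseA_loop css.toList [] [] 0 false

-- ===== PORT B =====
-- hand port of re.compile(r'/\*|\{|\}').search(css, pos): relative offset and kind of the leftmost
-- event in the remaining text; 'C' stands for the token '/*'. Exact on all inputs.
def findEvent : List Char → Option (Nat × Char)
  | [] => none
  | c :: rest =>
      if c = '/' ∧ rest.head? = some '*' then some (0, 'C')
      else if c = '{' then some (0, '{')
      else if c = '}' then some (0, '}')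
      else (findEvent rest).map (fun p => (p.1 + 1, p.2))

-- hand port of css.find('*/', pos): relative offset of the leftmost "*/"; none = Python's -1. Exact.
def findClose : List Char → Option Nat
  | [] => none
  | c :: rest =>
      if c = '*' ∧ rest.head? = some '/' then some 0
      else (findClose rest).map (· + 1)

-- needed by parseB_loop's termination proof (cited in decreasing_by)
lemma findEvent_lt : ∀ (l : List Char) (k : Nat) (t : Char), findEvent l = some (k, t) → k < l.length := by
  intro l
  induction l with
  | nil => intro k t h; simp [findEvent] at h
  | cons c rest ih =>
    intro k t h
    simp only [findEvent] at h
    split_ifs at h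
    · simp at h; simp only [List.length_cons]; omega
    · simp at h; simp only [List.length_cons]; omega
    · simp at h; simp only [List.length_cons]; omega
    · rcases Option.map_eq_some_iff.mp h with ⟨⟨k', t'⟩, h1, h2⟩
      have := ih k' t' h1
      simp at h2
      simp only [List.length_cons]
      omega

-- css[start:pos] for 0 ≤ start ≤ pos (the only way B slices): exact there.
def sliceSS (cs : List Char) (start pos : Nat) : String :=
  String.mk ((cs.drop start).take (pos - start))

-- the tail handling after B's loop: css[start:].strip(), appended if non-empty
def finishB (cs : List Char) (start : Nat) (blocks : List String) : List String :=
  if PySem.Str.strip (String.mk (cs.drop start)) ≠ "" then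
    blocks ++ [PySem.Str.strip (String.mk (cs.drop start))] else blocks

def parseB_loop (cs : List Char) (pos start : Nat) (lvl : Int) (blocks : List String) : List String :=
  match h : findEvent (cs.drop pos) with
  | none => finishB cs start blocks
  | some (k, t) =>
    if t = 'C' then
      match findClose (cs.drop (pos + k + 2)) with
      | none => finishB cs start blocks
      | some j => parseB_loop cs (pos + k + 2 + j + 2) start lvl blocks
    else if t = '{' then parseB_loop cs (pos + k + 1) start (lvl + 1) blocks
    else
      (if lvl - 1 = 0 then
        parseB_loop cs (pos + k + 1) (pos + k + 1) (lvl - 1)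
          (blocks ++ [PySem.Str.strip (sliceSS cs start (pos + k + 1))])
       else parseB_loop cs (pos + k + 1) start (lvl - 1) blocks)
termination_by cs.length - pos
decreasing_by
  all_goals
    have hk := findEvent_lt _ _ _ h
    simp only [List.length_drop] at hk
    omega

def parse_css_blocks_alt (css : String) : List String :=
  parseB_loop css.toList 0 0 0 []

-- ===== PRECONDITION & SPEC =====
def Spec_parse_css_blocks (css : String) (out : List String) : Prop := out = parse_css_blocks_alt css
instance (css : String) (out : List String) : Decidable (Spec_parse_css_blocks css out) := by unfold Spec_parse_css_blocks; infer_instance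

-- ===== CLAIM (what is proved, stated in full; the proofs are below) =====
def Claim_equal_parse_css_blocks : Prop := ∀ (css : String), Dom_parse_css_blocks css → Spec_parse_css_blocks css (parse_css_blocks css)

-- ===== LEMMAS AND PROOFS =====

-- B's state while inside a comment (between a matched '/*' and the next '*/'); proof-only helper.
def parseB_comment (cs : List Char) (pos start : Nat) (lvl : Int) (blocks : List String) : List String :=
  match findClose (cs.drop pos) with
  | none => finishB cs start blocks
  | some j => parseB_loop cs (pos + j + 2) start lvl blocks

lemma A_nil (blocks : List String) (cur : List Char) (lvl : Int) (inc : Bool) :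
    parseA_loop [] blocks cur lvl inc =
      (if PySem.Str.strip (String.mk cur) ≠ "" then blocks ++ [PySem.Str.strip (String.mk cur)] else blocks) := by
  rw [parseA_loop.eq_def]

lemma A_cons (c : Char) (rest : List Char) (blocks : List String) (cur : List Char) (lvl : Int) (inc : Bool) :
    parseA_loop (c :: rest) blocks cur lvl inc =
      (if ¬inc ∧ c = '/' ∧ rest.head? = some '*' then
        parseA_loop rest.tail blocks (cur ++ ['/', '*']) lvl true
      else if inc ∧ c = '*' ∧ rest.head? = some '/' then
        parseA_loop rest.tail blocks (cur ++ ['*', '/']) lvl false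
      else
        if ¬inc ∧ c = '{' then parseA_loop rest blocks (cur ++ [c]) (lvl + 1) inc
        else if ¬inc ∧ c = '}' then
          (if lvl - 1 = 0 then parseA_loop rest (blocks ++ [PySem.Str.strip (String.mk (cur ++ [c]))]) [] (lvl - 1) inc
           else parseA_loop rest blocks (cur ++ [c]) (lvl - 1) inc)
        else parseA_loop rest blocks (cur ++ [c]) lvl inc) := by
  rw [parseA_loop.eq_def]

lemma C_close (cs : List Char) (pos start : Nat) (lvl : Int) (blocks : List String)
    (rest : List Char) (h : cs.drop pos = '*' :: rest) (hr : rest.head? = some '/') :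
    parseB_comment cs pos start lvl blocks = parseB_loop cs (pos + 2) start lvl blocks := by
  have he : findClose (cs.drop pos) = some 0 := by simp [h, findClose, hr]
  unfold parseB_comment
  rw [he]

lemma C_skip (cs : List Char) (pos start : Nat) (lvl : Int) (blocks : List String)
    (c : Char) (rest : List Char) (h : cs.drop pos = c :: rest)
    (h1 : ¬(c = '*' ∧ rest.head? = some '/')) :
    parseB_comment cs pos start lvl blocks = parseB_comment cs (pos + 1) start lvl blocks := by
  have hd : cs.drop (pos + 1) = rest := by rw [← List.drop_drop, h]; rfl
  have he : findClose (cs.drop pos) = (findClose rest).map (· + 1) := by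
    rw [h, findClose, if_neg h1]
  unfold parseB_comment
  rw [he, hd]
  cases hfe : findClose rest with
  | none => rfl
  | some j =>
    simp only [Option.map_some]
    rw [show pos + (j + 1) + 2 = pos + 1 + j + 2 from by omega]

lemma C_nil (cs : List Char) (pos start : Nat) (lvl : Int) (blocks : List String)
    (h : cs.drop pos = []) : parseB_comment cs pos start lvl blocks = finishB cs start blocks := by
  unfold parseB_comment
  simp [h, findClose]

lemma B_nil (cs : List Char) (pos start : Nat) (lvl : Int) (blocks : List String)
    (h : cs.drop pos = []) : parseB_loop cs pos start lvl blocks = finishB cs start blocks := by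
  rw [parseB_loop.eq_def]
  have he : findEvent (cs.drop pos) = none := by simp [h, findEvent]
  split <;> simp_all

lemma B_open (cs : List Char) (pos start : Nat) (lvl : Int) (blocks : List String)
    (rest : List Char) (h : cs.drop pos = '/' :: rest) (hr : rest.head? = some '*') :
    parseB_loop cs pos start lvl blocks = parseB_comment cs (pos + 2) start lvl blocks := by
  have he : findEvent (cs.drop pos) = some (0, 'C') := by simp [h, findEvent, hr]
  rw [parseB_loop.eq_def, parseB_comment.eq_def]
  split
  · simp_all
  next k t hsome =>
    rw [he] at hsome
    injection hsome with h'
    injection h' with hk ht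
    subst hk; subst ht
    rfl

lemma B_lb (cs : List Char) (pos start : Nat) (lvl : Int) (blocks : List String)
    (rest : List Char) (h : cs.drop pos = '{' :: rest) :
    parseB_loop cs pos start lvl blocks = parseB_loop cs (pos + 1) start (lvl + 1) blocks := by
  have he : findEvent (cs.drop pos) = some (0, '{') := by simp [h, findEvent]
  rw [parseB_loop.eq_def]
  split
  · simp_all
  next k t hsome =>
    rw [he] at hsome
    injection hsome with h'
    injection h' with hk ht
    subst hk; subst ht
    rw [if_neg (by decide), if_pos rfl]

lemma B_rb (cs : List Char) (pos start : Nat) (lvl : Int) (blocks : List String)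
    (rest : List Char) (h : cs.drop pos = '}' :: rest) :
    parseB_loop cs pos start lvl blocks =
      (if lvl - 1 = 0 then
        parseB_loop cs (pos + 1) (pos + 1) (lvl - 1)
          (blocks ++ [PySem.Str.strip (sliceSS cs start (pos + 1))])
       else parseB_loop cs (pos + 1) start (lvl - 1) blocks) := by
  have he : findEvent (cs.drop pos) = some (0, '}') := by simp [h, findEvent]
  rw [parseB_loop.eq_def]
  split
  · simp_all
  next k t hsome =>
    rw [he] at hsome
    injection hsome with h'
    injection h' with hk ht
    subst hk; subst ht
    rw [if_neg (by decide), if_neg (by decide)]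

lemma B_skip (cs : List Char) (pos start : Nat) (lvl : Int) (blocks : List String)
    (c : Char) (rest : List Char) (h : cs.drop pos = c :: rest)
    (h1 : ¬(c = '/' ∧ rest.head? = some '*')) (h2 : c ≠ '{') (h3 : c ≠ '}') :
    parseB_loop cs pos start lvl blocks = parseB_loop cs (pos + 1) start lvl blocks := by
  have hd : cs.drop (pos + 1) = rest := by rw [← List.drop_drop, h]; rfl
  have he : findEvent (cs.drop pos) = (findEvent rest).map (fun p => (p.1 + 1, p.2)) := by
    rw [h, findEvent, if_neg h1, if_neg h2, if_neg h3]
  conv_lhs => rw [parseB_loop.eq_def]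
  conv_rhs => rw [parseB_loop.eq_def]
  rw [he, hd]
  cases hfe : findEvent rest with
  | none => rfl
  | some p =>
    obtain ⟨k, t⟩ := p
    simp only [Option.map_some]
    by_cases htc : t = 'C'
    · simp only [if_pos htc]
      rw [show pos + (k + 1) + 2 = pos + 1 + k + 2 from by omega]
    · by_cases htl : t = '{'
      · simp only [if_neg htc, if_pos htl]
        rw [show pos + (k + 1) + 1 = pos + 1 + k + 1 from by omega]
      · simp only [if_neg htc, if_neg htl]
        rw [show pos + (k + 1) + 1 = pos + 1 + k + 1 from by omega]

lemma slice_succ (cs : List Char) (start pos : Nat) (c : Char) (rest : List Char)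
    (h : cs.drop pos = c :: rest) (hle : start ≤ pos) :
    (cs.drop start).take (pos + 1 - start) = (cs.drop start).take (pos - start) ++ [c] := by
  have hc : cs[pos]? = some c := by
    have : (cs.drop pos)[0]? = cs[pos + 0]? := List.getElem?_drop
    simp [h] at this
    exact this.symm
  have h1 : pos + 1 - start = (pos - start) + 1 := by omega
  rw [h1, List.take_succ]
  have h2 : (cs.drop start)[pos - start]? = some c := by
    rw [List.getElem?_drop, Nat.add_sub_cancel' hle]
    exact hc
  simp [h2]

lemma sim_nil (cs : List Char) (pos start : Nat) (lvl : Int) (blocks : List String) (inc : Bool)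
    (hnil : cs.drop pos = []) (hs : start ≤ pos) :
    parseA_loop [] blocks ((cs.drop start).take (pos - start)) lvl inc
      = finishB cs start blocks := by
  have hlen : cs.length ≤ pos := List.drop_eq_nil_iff.mp hnil
  have hcur : (cs.drop start).take (pos - start) = cs.drop start := by
    apply List.take_of_length_le
    simp only [List.length_drop]
    omega
  rw [hcur, A_nil]
  rfl

-- the simulation invariant: A's current_block is exactly css[start:pos], the state B keeps as indices
lemma sim (n : Nat) : ∀ (cs : List Char) (pos start : Nat) (lvl : Int) (blocks : List String),
    cs.length - pos ≤ n → start ≤ pos →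
    (parseA_loop (cs.drop pos) blocks ((cs.drop start).take (pos - start)) lvl false
        = parseB_loop cs pos start lvl blocks)
    ∧ (parseA_loop (cs.drop pos) blocks ((cs.drop start).take (pos - start)) lvl true
        = parseB_comment cs pos start lvl blocks) := by
  induction n with
  | zero =>
    intro cs pos start lvl blocks hn hs
    have hnil : cs.drop pos = [] := by rw [List.drop_eq_nil_iff]; omega
    rw [hnil, B_nil cs pos start lvl blocks hnil, C_nil cs pos start lvl blocks hnil]
    exact ⟨sim_nil cs pos start lvl blocks false hnil hs, sim_nil cs pos start lvl blocks true hnil hs⟩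
  | succ n ih =>
    intro cs pos start lvl blocks hn hs
    cases hdrop : cs.drop pos with
    | nil =>
      rw [B_nil cs pos start lvl blocks hdrop, C_nil cs pos start lvl blocks hdrop]
      exact ⟨sim_nil cs pos start lvl blocks false hdrop hs, sim_nil cs pos start lvl blocks true hdrop hs⟩
    | cons c rest =>
      have hpos : pos < cs.length := by
        by_contra hh
        rw [List.drop_eq_nil_iff.mpr (by omega)] at hdrop
        cases hdrop
      have hd1 : cs.drop (pos + 1) = rest := by rw [← List.drop_drop, hdrop]; rfl
      have hs1 := slice_succ cs start pos c rest hdrop hs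
      constructor
      · -- inc = false
        rw [A_cons]
        by_cases hcom : c = '/' ∧ rest.head? = some '*'
        · obtain ⟨rfl, hr⟩ := hcom
          rw [if_pos ⟨by decide, rfl, hr⟩]
          cases rest with
          | nil => simp at hr
          | cons c2 rest2 =>
            simp only [List.head?_cons, Option.some.injEq] at hr
            subst hr
            have hd2 : cs.drop (pos + 2) = rest2 := by
              rw [show pos + 2 = pos + 1 + 1 from rfl, ← List.drop_drop, hd1]
              rfl
            have hs2 := slice_succ cs start (pos + 1) '*' rest2 (by rw [hd1]) (by omega)
            have hcur2 : (cs.drop start).take (pos - start) ++ ['/', '*']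
                = (cs.drop start).take (pos + 2 - start) := by
              rw [show pos + 2 - start = pos + 1 + 1 - start from rfl, hs2, hs1]
              simp
            rw [B_open cs pos start lvl blocks ('*' :: rest2) hdrop (by rfl),
                show (('*' :: rest2 : List Char)).tail = rest2 from rfl, ← hd2, hcur2]
            exact (ih cs (pos + 2) start lvl blocks (by omega) (by omega)).2
        · rw [if_neg (by simpa using fun h1 h2 => hcom ⟨h1, h2⟩),
              if_neg (by simp)]
          by_cases hlb : c = '{'
          · subst hlb
            rw [if_pos ⟨by decide, rfl⟩, ← hd1, ← hs1,
                B_lb cs pos start lvl blocks rest hdrop]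
            exact (ih cs (pos + 1) start (lvl + 1) blocks (by omega) (by omega)).1
          · by_cases hrb : c = '}'
            · subst hrb
              rw [if_neg (by simp), if_pos ⟨by decide, rfl⟩,
                  B_rb cs pos start lvl blocks rest hdrop]
              by_cases hz : lvl - 1 = 0
              · rw [if_pos hz, if_pos hz]
                have hsl : PySem.Str.strip (String.mk ((cs.drop start).take (pos - start) ++ ['}']))
                    = PySem.Str.strip (sliceSS cs start (pos + 1)) := by
                  rw [sliceSS, ← hs1]
                rw [hsl, ← hd1]
                rw [show rest = cs.drop (pos + 1) from hd1.symm] at *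
                have := (ih cs (pos + 1) (pos + 1) (lvl - 1)
                  (blocks ++ [PySem.Str.strip (sliceSS cs start (pos + 1))]) (by omega) (by omega)).1
                simpa using this
              · rw [if_neg hz, if_neg hz, ← hd1, ← hs1]
                exact (ih cs (pos + 1) start (lvl - 1) blocks (by omega) (by omega)).1
            · rw [if_neg (by simp [hlb]), if_neg (by simp [hrb]),
                  ← hd1, ← hs1, B_skip cs pos start lvl blocks c rest hdrop hcom hlb hrb]
              exact (ih cs (pos + 1) start lvl blocks (by omega) (by omega)).1
      · -- inc = true
        rw [A_cons]
        rw [if_neg (by simp)]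
        by_cases hcl : c = '*' ∧ rest.head? = some '/'
        · obtain ⟨rfl, hr⟩ := hcl
          rw [if_pos ⟨by decide, rfl, hr⟩]
          cases rest with
          | nil => simp at hr
          | cons c2 rest2 =>
            simp only [List.head?_cons, Option.some.injEq] at hr
            subst hr
            have hd2 : cs.drop (pos + 2) = rest2 := by
              rw [show pos + 2 = pos + 1 + 1 from rfl, ← List.drop_drop, hd1]
              rfl
            have hs2 := slice_succ cs start (pos + 1) '/' rest2 (by rw [hd1]) (by omega)
            have hcur2 : (cs.drop start).take (pos - start) ++ ['*', '/']
                = (cs.drop start).take (pos + 2 - start) := by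
              rw [show pos + 2 - start = pos + 1 + 1 - start from rfl, hs2, hs1]
              simp
            rw [C_close cs pos start lvl blocks ('/' :: rest2) hdrop (by rfl),
                show (('/' :: rest2 : List Char)).tail = rest2 from rfl, ← hd2, hcur2]
            exact (ih cs (pos + 2) start lvl blocks (by omega) (by omega)).1
        · rw [if_neg (by simpa using fun h1 h2 => hcl ⟨h1, h2⟩),
              if_neg (by simp), if_neg (by simp),
              ← hd1, ← hs1, C_skip cs pos start lvl blocks c rest hdrop hcl]
          exact (ih cs (pos + 1) start lvl blocks (by omega) (by omega)).2

-- ===== VERDICT (by name: the statement is the Claim_ definition above) =====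
theorem parse_css_blocks_spec : Claim_equal_parse_css_blocks := by
  intro css _
  unfold Spec_parse_css_blocks parse_css_blocks parse_css_blocks_alt
  have := (sim css.toList.length css.toList 0 0 0 [] (by omega) (le_refl 0)).1
  simpa using this
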